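-- pv_equiv track=rewrite | github.com/daniel-reich/ubiquitous-fiesta | ivWdkjsHtKSMZuNEc_20.py | find_shortest_words
-- ===== SOURCE A (Python) =====
-- def find_shortest_words(txt):
--   words = txt[:-1].lower().split()
--   tlst = []
--   for word in words:
--     if not word.isalpha():
--       continue
--     tlst.append((len(word), word))
--   tlst.sort()
--   wds = []
--   for l, w in tlst:
--     if l == tlst[0][0]:
--       wds.append(w)
--   return wds
-- ===== SOURCE B (Python) =====
-- def find_shortest_words(txt):
--   words = [w for w in txt[:-1].lower().split() if w.isalpha()]
--   if not words:
--     return []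
--   m = min(len(w) for w in words)
--   return sorted(w for w in words if len(w) == m)
-- ===== Notes on version B (the rewrite author's own statement) =====
-- stated objective: alternative
-- what changed: Instead of sorting the full (length, word) pair list and scanning it against its head, B computes the minimum length in one pass and sorts only the minimum-length words alphabetically.
import Mathlib
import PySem

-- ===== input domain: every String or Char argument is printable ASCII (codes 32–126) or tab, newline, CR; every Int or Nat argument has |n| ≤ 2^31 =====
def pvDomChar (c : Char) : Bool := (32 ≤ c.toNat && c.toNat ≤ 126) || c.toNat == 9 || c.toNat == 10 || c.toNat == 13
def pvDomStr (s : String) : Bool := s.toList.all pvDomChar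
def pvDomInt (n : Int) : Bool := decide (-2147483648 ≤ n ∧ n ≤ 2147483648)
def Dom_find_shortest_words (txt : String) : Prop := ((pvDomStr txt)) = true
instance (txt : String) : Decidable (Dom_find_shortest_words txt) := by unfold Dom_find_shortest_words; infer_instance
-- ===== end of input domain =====

-- B replaces A's sort of the full (length, word) pair list by one min-length pass plus a sort
-- of only the minimum-length words (objective: alternative decomposition; equivalence proved below).

-- ===== PORT A =====
def find_shortest_words (txt : String) : List String :=
  let words := PySem.Str.split₀ (PySem.Str.lower (PySem.Str.slice txt none (some (-1))))
  let tlst := words.foldl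
    (fun acc word =>
      if !(PySem.Str.strIsalpha word) then acc
      else acc ++ [(PySem.Str.len word, word)])
    ([] : List (Int × String))
  -- tlst.sort(): Python sorts the pairs lexicographically = stable sort by the Lex key
  let tlst := PySem.List.sorted tlst (fun p => (toLex p : Lex (Int × String)))
  tlst.foldl
    (fun wds p =>
      if p.1 == (PySem.List.pyGetD tlst 0 ((0 : Int), "")).1 then wds ++ [p.2] else wds)
    []

-- ===== PORT B =====
def find_shortest_words_alt (txt : String) : List String :=
  let words := (PySem.Str.split₀ (PySem.Str.lower (PySem.Str.slice txt none (some (-1))))).filter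
    (fun w => PySem.Str.strIsalpha w)
  match PySem.List.min? (words.map PySem.Str.len) (fun x => x) with
  | none => []
  | some m => PySem.List.sorted (words.filter (fun w => PySem.Str.len w == m)) (fun w => w)

-- ===== PRECONDITION & SPEC =====
def Spec_find_shortest_words (txt : String) (out : List String) : Prop := out = find_shortest_words_alt txt
instance (txt : String) (out : List String) : Decidable (Spec_find_shortest_words txt out) := by unfold Spec_find_shortest_words; infer_instance

-- ===== CLAIM (what is proved, stated in full; the proofs are below) =====
def Claim_equal_find_shortest_words : Prop := ∀ (txt : String), Dom_find_shortest_words txt → Spec_find_shortest_words txt (find_shortest_words txt)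

-- ===== LEMMAS AND PROOFS =====

-- empty case: no alphabetic words, A's scan is over the empty list
theorem pv_core_nil (ws : List String) (S : List (Int × String))
    (hSdef : S = PySem.List.sorted (ws.map (fun w => (PySem.Str.len w, w)))
      (fun p => (toLex p : Lex (Int × String))))
    (h : PySem.List.min? (ws.map PySem.Str.len) (fun x => x) = none) :
    (S.foldl (fun wds p =>
       if p.1 == (PySem.List.pyGetD S 0 ((0 : Int), "")).1 then wds ++ [p.2] else wds) []) = [] := by
  have hwsnil : ws = [] := by simpa using (PySem.List.min?_eq_none_iff _ _).mp h
  subst hwsnil; subst hSdef; rfl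

-- main case: the words kept by A's scan of the sorted pair list are exactly the minimum-length
-- words in alphabetical order
theorem pv_core_min (ws : List String) (S : List (Int × String)) (m : Int)
    (hSdef : S = PySem.List.sorted (ws.map (fun w => (PySem.Str.len w, w)))
      (fun p => (toLex p : Lex (Int × String))))
    (hws : PySem.List.min? (ws.map PySem.Str.len) (fun x => x) = some m) :
    (S.foldl (fun wds p =>
       if p.1 == (PySem.List.pyGetD S 0 ((0 : Int), "")).1 then wds ++ [p.2] else wds) []) =
    PySem.List.sorted (ws.filter (fun w => PySem.Str.len w == m)) (fun w => w) := by
  have hfold :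
      S.foldl (fun wds p =>
        if p.1 == (PySem.List.pyGetD S 0 ((0 : Int), "")).1 then wds ++ [p.2] else wds) [] =
      (S.filter (fun p => p.1 == (PySem.List.pyGetD S 0 ((0 : Int), "")).1)).map (fun p => p.2) := by
    simpa using PySem.List.foldl_append_if
      (fun p => p.1 == (PySem.List.pyGetD S 0 ((0 : Int), "")).1) (fun p => p.2) S []
  rw [hfold]
  have hperm : S.Perm (ws.map (fun w => (PySem.Str.len w, w))) := by
    rw [hSdef]; exact PySem.List.sorted_perm _ _ _
  have hmmem : m ∈ ws.map PySem.Str.len := PySem.List.min?_mem hws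
  have hmin : ∀ y ∈ ws.map PySem.Str.len, m ≤ y := by
    intro y hy; exact PySem.List.min?_isMin hws y hy
  -- S is nonempty
  cases hS : S with
  | nil =>
    rw [hS] at hperm
    have hwsnil : ws = [] := by simpa using hperm.symm.eq_nil
    subst hwsnil
    simp [PySem.List.min?] at hws
  | cons p0 t =>
      rw [← hS]
      -- the head's first component is the minimum length m
      have hp0mem : p0 ∈ ws.map (fun w => (PySem.Str.len w, w)) :=
        hperm.mem_iff.mp (by rw [hS]; exact List.mem_cons_self)
      have hp0fst_ge : m ≤ p0.1 := by
        obtain ⟨w0, hw0, hw0e⟩ := List.mem_map.mp hp0mem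
        have h1 : m ≤ PySem.Str.len w0 := hmin _ (List.mem_map_of_mem hw0)
        rw [← hw0e]; exact h1
      have hp0fst_le : p0.1 ≤ m := by
        obtain ⟨w1, hw1, hw1e⟩ := List.mem_map.mp hmmem
        have hw1m : (PySem.Str.len w1, w1) ∈ ws.map (fun w => (PySem.Str.len w, w)) :=
          List.mem_map_of_mem hw1
        have hle := PySem.List.key_head_sorted_le
          (ws.map (fun w => (PySem.Str.len w, w)))
          (fun p => (toLex p : Lex (Int × String))) (hSdef ▸ hS) _ hw1m
        rcases Prod.Lex.le_iff.mp hle with h | h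
        · rw [← hw1e]; exact le_of_lt h
        · rw [← hw1e]; exact le_of_eq h.1
      have hc : (PySem.List.pyGetD S 0 ((0 : Int), "")).1 = m := by
        rw [hS]
        simpa [PySem.List.pyGetD, PySem.List.pyGet?, PySem.List.pyIdx?] using
          le_antisymm hp0fst_le hp0fst_ge
      rw [hc]
      -- apply sorted_id characterization
      refine (PySem.List.sorted_id_eq_of_perm_of_pairwise _ _ ?_ ?_).symm
      · -- permutation
        have h1 : (S.filter (fun p => p.1 == m)).Perm
            ((ws.map (fun w => (PySem.Str.len w, w))).filter (fun p => p.1 == m)) :=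
          List.Perm.filter _ hperm
        have h2 : (ws.map (fun w => (PySem.Str.len w, w))).filter (fun p => p.1 == m) =
            (ws.filter (fun w => PySem.Str.len w == m)).map (fun w => (PySem.Str.len w, w)) := by
          rw [List.filter_map]; rfl
        have h3 := (h1.map (fun p => p.2))
        rw [h2, List.map_map] at h3
        refine h3.trans ?_
        rw [show ((fun p : Int × String => p.2) ∘ fun w => (PySem.Str.len w, w)) = id from rfl]
        simp
      · -- pairwise ≤ among the kept second components
        have hpw : S.Pairwise (fun a b =>
            (toLex a : Lex (Int × String)) ≤ toLex b) := by
          rw [hSdef]; exact PySem.List.sorted_pairwise _ _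
        have hpf : (S.filter (fun p => p.1 == m)).Pairwise (fun a b =>
            (toLex a : Lex (Int × String)) ≤ toLex b) :=
          List.Pairwise.sublist List.filter_sublist hpw
        rw [List.pairwise_map]
        refine List.Pairwise.imp_of_mem ?_ hpf
        intro a b ha hb hle
        have ham : a.1 = m := by simpa using (List.mem_filter.mp ha).2
        have hbm : b.1 = m := by simpa using (List.mem_filter.mp hb).2
        rcases Prod.Lex.le_iff.mp hle with h | h
        · exfalso
          have h' : a.1 < b.1 := h
          rw [ham, hbm] at h'; exact lt_irrefl m h'
        · exact h.2

-- rewrite A's pair-building fold as filter + map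
theorem pv_build (words : List String) :
    words.foldl
      (fun acc word =>
        if !(PySem.Str.strIsalpha word) then acc
        else acc ++ [(PySem.Str.len word, word)])
      ([] : List (Int × String)) =
    (words.filter (fun w => PySem.Str.strIsalpha w)).map (fun w => (PySem.Str.len w, w)) := by
  have h : (fun (acc : List (Int × String)) word =>
        if !(PySem.Str.strIsalpha word) then acc
        else acc ++ [(PySem.Str.len word, word)]) =
      (fun acc word =>
        if PySem.Str.strIsalpha word then acc ++ [(PySem.Str.len word, word)] else acc) := by
    funext acc word; cases h : PySem.Str.strIsalpha word <;> simp
  rw [h]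
  simpa using PySem.List.foldl_append_if
    (fun w => PySem.Str.strIsalpha w) (fun w => (PySem.Str.len w, w)) words []

-- ===== VERDICT (by name: the statement is the Claim_ definition above) =====
theorem find_shortest_words_spec : Claim_equal_find_shortest_words := by
  intro txt _
  show find_shortest_words txt = find_shortest_words_alt txt
  unfold find_shortest_words find_shortest_words_alt
  dsimp only
  rw [pv_build]
  cases h : PySem.List.min?
      (((PySem.Str.split₀ (PySem.Str.lower (PySem.Str.slice txt none (some (-1))))).filter
        (fun w => PySem.Str.strIsalpha w)).map PySem.Str.len) (fun x => x) with
  | none => exact pv_core_nil _ _ rfl h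
  | some m => exact pv_core_min _ _ m rfl h
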